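-- pv_equiv track=rewrite | github.com/solentlabs/cable_modem_monitor | packages/cable_modem_monitor_core/solentlabs/cable_modem_monitor_core/mcp/analysis/format/hnap.py | _collect_position_samples
-- ===== SOURCE A (Python) =====
-- def _collect_position_samples(
--     sample_records: list[list[str]],
--     field_count: int,
-- ) -> list[list[str]]:
--     """Collect non-empty stripped samples for each field position."""
--     position_samples: list[list[str]] = []
--     for idx in range(field_count):
--         samples = [r[idx].strip() for r in sample_records if idx < len(r) and r[idx].strip()]
--         position_samples.append(samples)
--     return position_samples
-- ===== SOURCE B (Python) =====
-- def _collect_position_samples(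
--     sample_records: list[list[str]],
--     field_count: int,
-- ) -> list[list[str]]:
--     """Collect non-empty stripped samples for each field position."""
--     position_samples: list[list[str]] = [[] for _ in range(field_count)]
--     for r in sample_records:
--         for idx in range(min(len(r), field_count)):
--             s = r[idx].strip()
--             if s:
--                 position_samples[idx].append(s)
--     return position_samples
-- ===== Notes on version B (the rewrite author's own statement) =====
-- stated objective: alternative
-- what changed: Replaces the per-field rescan of all records (one comprehension over sample_records for each idx in range(field_count)) with a single forward pass over the records that transposes each record into pre-sized position buckets, stripping each cell once.
import Mathlib
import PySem

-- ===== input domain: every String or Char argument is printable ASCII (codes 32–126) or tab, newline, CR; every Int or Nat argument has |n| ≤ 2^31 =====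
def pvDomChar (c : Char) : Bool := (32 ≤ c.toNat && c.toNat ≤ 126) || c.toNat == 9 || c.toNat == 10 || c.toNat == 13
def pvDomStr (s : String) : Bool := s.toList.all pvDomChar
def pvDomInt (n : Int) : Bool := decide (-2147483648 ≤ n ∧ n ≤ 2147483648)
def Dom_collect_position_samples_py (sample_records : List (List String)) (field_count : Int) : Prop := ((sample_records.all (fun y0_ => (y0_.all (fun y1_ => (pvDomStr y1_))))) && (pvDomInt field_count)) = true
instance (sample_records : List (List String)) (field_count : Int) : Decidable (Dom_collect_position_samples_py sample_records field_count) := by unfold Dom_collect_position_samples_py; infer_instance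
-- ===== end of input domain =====

-- B replaces A's per-field rescan of all records with one forward pass transposing
-- the records into pre-sized position buckets (alternative decomposition, same results).

-- ===== PORT A =====
-- r[idx] is ported as pyGetD with default "": every access is guarded by idx < len(r)
-- (and 0 ≤ idx from range), so the default is never returned.
def collect_position_samples_py (sample_records : List (List String)) (field_count : Int) : List (List String) :=
  (PySem.List.pyRange 0 field_count 1).foldl
    (fun position_samples idx =>
      let samples := sample_records.foldl
        (fun samples r =>
          if idx < (r.length : Int) ∧ PySem.Str.strip (PySem.List.pyGetD r idx "") ≠ "" then
            samples ++ [PySem.Str.strip (PySem.List.pyGetD r idx "")]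
          else samples) []
      position_samples ++ [samples]) []

-- ===== PORT B =====
def collect_position_samples_py_alt (sample_records : List (List String)) (field_count : Int) : List (List String) :=
  sample_records.foldl
    (fun position_samples r =>
      (PySem.List.pyRange 0 (min (r.length : Int) field_count) 1).foldl
        (fun bs idx =>
          if PySem.Str.strip (PySem.List.pyGetD r idx "") ≠ "" then
            bs.modify idx.toNat (fun l => l ++ [PySem.Str.strip (PySem.List.pyGetD r idx "")])
          else bs)
        position_samples)
    ((PySem.List.pyRange 0 field_count 1).map (fun _ => ([] : List String)))

-- ===== PRECONDITION & SPEC =====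
def Spec_collect_position_samples_py (sample_records : List (List String)) (field_count : Int) (out : List (List String)) : Prop := out = collect_position_samples_py_alt sample_records field_count
instance (sample_records : List (List String)) (field_count : Int) (out : List (List String)) : Decidable (Spec_collect_position_samples_py sample_records field_count out) := by unfold Spec_collect_position_samples_py; infer_instance

-- ===== CLAIM (what is proved, stated in full; the proofs are below) =====
def Claim_equal_collect_position_samples_py : Prop := ∀ (sample_records : List (List String)) (field_count : Int), Dom_collect_position_samples_py sample_records field_count → Spec_collect_position_samples_py sample_records field_count (collect_position_samples_py sample_records field_count)

-- ===== LEMMAS AND PROOFS =====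

-- the cell contributed by record r at position idx (possibly empty)
def pvOne (r : List String) (idx : Int) : List String :=
  if idx < (r.length : Int) ∧ PySem.Str.strip (PySem.List.pyGetD r idx "") ≠ "" then
    [PySem.Str.strip (PySem.List.pyGetD r idx "")]
  else []

-- the full bucket for position idx
def pvBucket (sample_records : List (List String)) (idx : Int) : List String :=
  sample_records.foldr (fun r acc => pvOne r idx ++ acc) []

theorem pvBucket_cons (r : List String) (rs : List (List String)) (idx : Int) :
    pvBucket (r :: rs) idx = pvOne r idx ++ pvBucket rs idx := rfl

-- A's inner comprehension computes pvBucket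
theorem pvA_inner (rs : List (List String)) (idx : Int) (acc : List String) :
    rs.foldl
      (fun samples r =>
        if idx < (r.length : Int) ∧ PySem.Str.strip (PySem.List.pyGetD r idx "") ≠ "" then
          samples ++ [PySem.Str.strip (PySem.List.pyGetD r idx "")]
        else samples) acc = acc ++ pvBucket rs idx := by
  induction rs generalizing acc with
  | nil => simp [pvBucket]
  | cons r rs ih =>
      simp only [List.foldl_cons, pvBucket_cons, ih, pvOne]
      split_ifs <;> simp

theorem pvA_eq_map (rs : List (List String)) (fc : Int) :
    collect_position_samples_py rs fc
      = (PySem.List.pyRange 0 fc 1).map (fun idx => pvBucket rs idx) := by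
  unfold collect_position_samples_py
  simp only [pvA_inner, List.nil_append]
  exact PySem.List.foldl_append_singleton_eq_map _ _ _

-- modifying a mapped range at one in-range index rewrites the map pointwise
theorem pvModify_map_pyRange (fc : Int) (g : Int → List String) (k : Nat)
    (h : List String → List String) :
    (((PySem.List.pyRange 0 fc 1).map g).modify k h)
      = (PySem.List.pyRange 0 fc 1).map
          (fun j => if j = (k : Int) then h (g (k : Int)) else g j) := by
  apply List.ext_getElem
  · simp
  · intro i h1 h2
    rw [List.getElem_modify]
    simp only [List.getElem_map, PySem.List.getElem_pyRange_one, zero_add]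
    by_cases hik : k = i
    · subst hik; simp
    · rw [if_neg hik, if_neg (by omega : ¬ ((i : Int) = (k : Int)))]

-- B's inner loop maps the empty state to the empty state
theorem pvInner_nil (r : List String) (l : List Int) :
    l.foldl
      (fun bs idx =>
        if PySem.Str.strip (PySem.List.pyGetD r idx "") ≠ "" then
          bs.modify idx.toNat (fun l => l ++ [PySem.Str.strip (PySem.List.pyGetD r idx "")])
        else bs)
      ([] : List (List String)) = [] := by
  induction l with
  | nil => rfl
  | cons x l ih => simp only [List.foldl_cons]; split_ifs <;> simpa using ih

-- with an empty bucket list (field_count ≤ 0) B's outer fold is constant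
theorem pvB_nil (rs : List (List String)) (fc : Int) :
    rs.foldl
      (fun position_samples r =>
        (PySem.List.pyRange 0 (min (r.length : Int) fc) 1).foldl
          (fun bs idx =>
            if PySem.Str.strip (PySem.List.pyGetD r idx "") ≠ "" then
              bs.modify idx.toNat (fun l => l ++ [PySem.Str.strip (PySem.List.pyGetD r idx "")])
            else bs)
          position_samples)
      ([] : List (List String)) = [] := by
  induction rs with
  | nil => rfl
  | cons r rs ih => simp only [List.foldl_cons, pvInner_nil]; exact ih

-- one record's inner loop, bounded by m, applied to a mapped-range state
theorem pvRecLoop (r : List String) (fc : Int) (g : Int → List String)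
    (m : Nat) (hm : (m : Int) ≤ fc) :
    (PySem.List.pyRange 0 (m : Int) 1).foldl
      (fun bs idx =>
        if PySem.Str.strip (PySem.List.pyGetD r idx "") ≠ "" then
          bs.modify idx.toNat (fun l => l ++ [PySem.Str.strip (PySem.List.pyGetD r idx "")])
        else bs)
      ((PySem.List.pyRange 0 fc 1).map g)
    = (PySem.List.pyRange 0 fc 1).map
        (fun idx => g idx ++
          (if idx < (m : Int) ∧ PySem.Str.strip (PySem.List.pyGetD r idx "") ≠ ""
           then [PySem.Str.strip (PySem.List.pyGetD r idx "")] else [])) := by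
  induction m generalizing g with
  | zero =>
      rw [PySem.List.pyRange_one_eq_nil (show ((0:Nat):Int) ≤ 0 by omega)]
      simp only [List.foldl_nil]
      refine (List.map_congr_left fun a ha => ?_).symm
      rw [PySem.List.mem_pyRange_one] at ha
      rw [if_neg (fun hc => absurd hc.1 (by omega)), List.append_nil]
  | succ m ih =>
      have hm' : (m : Int) ≤ fc := by omega
      rw [show ((m + 1 : Nat) : Int) = (m : Int) + 1 by push_cast; ring,
          PySem.List.pyRange_one_succ_right (by omega), List.foldl_append, ih g hm']
      simp only [List.foldl_cons, List.foldl_nil]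
      by_cases hs : PySem.Str.strip (PySem.List.pyGetD r (m : Int) "") ≠ ""
      · rw [if_pos hs, show ((m : Int)).toNat = m by omega, pvModify_map_pyRange]
        refine List.map_congr_left fun j hj => ?_
        rw [PySem.List.mem_pyRange_one] at hj
        by_cases hjm : j = (m : Int)
        · subst hjm
          rw [if_pos rfl, if_neg (fun hc => absurd hc.1 (by omega)),
              if_pos ⟨by omega, hs⟩, List.append_nil]
        · rw [if_neg hjm]
          by_cases hlt : j < (m : Int)
          · by_cases hc : PySem.Str.strip (PySem.List.pyGetD r j "") ≠ ""
            · rw [if_pos ⟨hlt, hc⟩, if_pos ⟨by omega, hc⟩]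
            · rw [if_neg (fun h => absurd h.2 hc), if_neg (fun h => absurd h.2 hc)]
          · rw [if_neg (fun h => absurd h.1 hlt),
                if_neg (fun h => absurd h.1 (by omega))]
      · rw [if_neg hs]
        refine List.map_congr_left fun j hj => ?_
        rw [PySem.List.mem_pyRange_one] at hj
        by_cases hjm : j = (m : Int)
        · subst hjm
          rw [if_neg (fun hc => absurd hc.1 (by omega)), if_neg (fun hc => absurd hc.2 hs)]
        · by_cases hlt : j < (m : Int)
          · by_cases hc : PySem.Str.strip (PySem.List.pyGetD r j "") ≠ ""
            · rw [if_pos ⟨hlt, hc⟩, if_pos ⟨by omega, hc⟩]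
            · rw [if_neg (fun h => absurd h.2 hc), if_neg (fun h => absurd h.2 hc)]
          · rw [if_neg (fun h => absurd h.1 hlt),
                if_neg (fun h => absurd h.1 (by omega))]

-- invariant of B's outer fold: buckets collect pvBucket position-wise
theorem pvB_inv (rs : List (List String)) (fc : Int) (hfc : 0 < fc) :
    ∀ g : Int → List String,
    rs.foldl
      (fun position_samples r =>
        (PySem.List.pyRange 0 (min (r.length : Int) fc) 1).foldl
          (fun bs idx =>
            if PySem.Str.strip (PySem.List.pyGetD r idx "") ≠ "" then
              bs.modify idx.toNat (fun l => l ++ [PySem.Str.strip (PySem.List.pyGetD r idx "")])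
            else bs)
          position_samples)
      ((PySem.List.pyRange 0 fc 1).map g)
    = (PySem.List.pyRange 0 fc 1).map (fun idx => g idx ++ pvBucket rs idx) := by
  induction rs with
  | nil =>
      intro g
      simp only [List.foldl_nil]
      exact List.map_congr_left fun a _ => by rw [pvBucket]; simp
  | cons r rs ih =>
      intro g
      have hM : ((min (r.length : Int) fc).toNat : Int) = min (r.length : Int) fc := by omega
      simp only [List.foldl_cons]
      rw [show min (r.length : Int) fc = (((min (r.length : Int) fc).toNat : Nat) : Int) from hM.symm,
          pvRecLoop r fc g _ (by omega), ih]
      refine List.map_congr_left fun j hj => ?_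
      rw [PySem.List.mem_pyRange_one] at hj
      rw [pvBucket_cons, pvOne]
      have hiff : (j < ((min (r.length : Int) fc).toNat : Int)) ↔ (j < (r.length : Int)) := by omega
      by_cases hc : PySem.Str.strip (PySem.List.pyGetD r j "") ≠ ""
      · by_cases hlt : j < (r.length : Int)
        · rw [if_pos ⟨hiff.mpr hlt, hc⟩, if_pos ⟨hlt, hc⟩, List.append_assoc]
        · rw [if_neg (fun h => absurd (hiff.mp h.1) hlt), if_neg (fun h => absurd h.1 hlt),
              List.append_nil, List.nil_append]
      · rw [if_neg (fun h => absurd h.2 hc), if_neg (fun h => absurd h.2 hc),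
            List.append_nil, List.nil_append]

theorem pvB_eq_map (rs : List (List String)) (fc : Int) :
    collect_position_samples_py_alt rs fc
      = (PySem.List.pyRange 0 fc 1).map (fun idx => pvBucket rs idx) := by
  unfold collect_position_samples_py_alt
  by_cases hfc : 0 < fc
  · rw [pvB_inv rs fc hfc (fun _ => [])]
    exact List.map_congr_left fun a _ => by simp
  · rw [PySem.List.pyRange_one_eq_nil (by omega), List.map_nil, List.map_nil]
    exact pvB_nil rs fc

-- ===== VERDICT (by name: the statement is the Claim_ definition above) =====
theorem collect_position_samples_py_spec : Claim_equal_collect_position_samples_py := by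
  intro rs fc _
  unfold Spec_collect_position_samples_py
  rw [pvA_eq_map, pvB_eq_map]
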